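-- pv_equiv track=rewrite | github.com/Kushagra9399/dpc2025 | day6.py | day6_sol
-- ===== SOURCE A (Python) =====
-- def day6_sol(arr):
--     l = []
--     sums = {0 : [-1]}
--     curr_sum = 0
--     for i in range(len(arr)):
--         curr_sum += arr[i]
--         if curr_sum in sums:
--             for j in sums[curr_sum]:
--                 l.append((j+1,i))
--             sums[curr_sum].append(i)
--         else:
--             sums[curr_sum] = [i]
--     return l
-- ===== SOURCE B (Python) =====
-- def day6_sol(arr):
--     pre = [0]
--     for x in arr:
--         pre.append(pre[-1] + x)
--     out = []
--     for i in range(len(arr)):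
--         for s in range(i + 1):
--             if pre[i + 1] == pre[s]:
--                 out.append((s, i))
--     return out
-- ===== Notes on version B (the rewrite author's own statement) =====
-- stated objective: simpler
-- what changed: Replaced the dict-of-index-lists single pass with a precomputed prefix-sum array and a naive end-major/start-minor nested scan that emits (s,i) whenever pre[i+1]==pre[s]; no hash map or per-sum lists are maintained.
import Mathlib
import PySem

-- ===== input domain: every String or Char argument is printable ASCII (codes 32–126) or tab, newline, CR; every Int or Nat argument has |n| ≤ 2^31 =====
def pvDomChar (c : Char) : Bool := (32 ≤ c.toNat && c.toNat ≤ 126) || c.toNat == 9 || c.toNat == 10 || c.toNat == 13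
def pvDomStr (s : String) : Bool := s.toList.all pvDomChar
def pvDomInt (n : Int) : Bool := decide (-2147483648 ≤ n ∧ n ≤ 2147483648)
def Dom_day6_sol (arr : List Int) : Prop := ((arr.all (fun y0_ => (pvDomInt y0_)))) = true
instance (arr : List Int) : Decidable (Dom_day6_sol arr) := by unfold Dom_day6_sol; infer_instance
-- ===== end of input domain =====

-- B replaces A's dict-of-index-lists single pass by a prefix-sum array plus a naive nested scan (simpler; not faster).


-- ===== PORT A =====
-- loop body of A: state = (l, sums, curr_sum); arr[i] read via pyGetD (i is always in range 0..len-1)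
def day6Step (arr : List Int)
    (st : List (Int × Int) × PySem.Dict Int (List Int) × Int) (i : Int) :
    List (Int × Int) × PySem.Dict Int (List Int) × Int :=
  let curr := st.2.2 + PySem.List.pyGetD arr i 0
  match (st.2.1).get? curr with
  | some js => (st.1 ++ js.map (fun j => (j + 1, i)), (st.2.1).insert curr (js ++ [i]), curr)
  | none => (st.1, (st.2.1).insert curr [i], curr)

def day6_sol (arr : List Int) : List (Int × Int) :=
  ((PySem.List.pyRange 0 (PySem.List.len arr) 1).foldl (day6Step arr)
    ([], PySem.Dict.ofList [((0 : Int), [(-1 : Int)])], 0)).1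

-- ===== PORT B =====
def day6_sol_alt (arr : List Int) : List (Int × Int) :=
  let pre := arr.foldl (fun p x => p ++ [PySem.List.pyGetD p (-1) 0 + x]) [(0 : Int)]
  (PySem.List.pyRange 0 (PySem.List.len arr) 1).foldl
    (fun out i =>
      (PySem.List.pyRange 0 (i + 1) 1).foldl
        (fun out s =>
          if PySem.List.pyGetD pre (i + 1) 0 = PySem.List.pyGetD pre s 0 then
            out ++ [(s, i)]
          else out)
        out)
    []

-- ===== PRECONDITION & SPEC =====
def Spec_day6_sol (arr : List Int) (out : List (Int × Int)) : Prop := out = day6_sol_alt arr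
instance (arr : List Int) (out : List (Int × Int)) : Decidable (Spec_day6_sol arr out) := by unfold Spec_day6_sol; infer_instance

-- ===== CLAIM (what is proved, stated in full; the proofs are below) =====
def Claim_equal_day6_sol : Prop := ∀ (arr : List Int), Dom_day6_sol arr → Spec_day6_sol arr (day6_sol arr)

-- ===== LEMMAS AND PROOFS =====

-- prefix sum of the first t elements
def Psum (arr : List Int) (t : Nat) : Int := (arr.take t).sum

-- the pairs both programs emit with end index i, in ascending start order
def chunk (arr : List Int) (i : Nat) : List (Int × Int) :=
  ((List.range (i + 1)).filter (fun s => Psum arr s = Psum arr (i + 1))).map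
    (fun s : Nat => ((s : Int), (i : Int)))

-- the list A stores in sums[v] after processing t elements (j = start-1, ascending)
def Fjs (arr : List Int) (v : Int) (t : Nat) : List Int :=
  ((List.range (t + 1)).filter (fun s => Psum arr s = v)).map (fun s : Nat => (s : Int) - 1)

def AInv (arr : List Int) (t : Nat)
    (st : List (Int × Int) × PySem.Dict Int (List Int) × Int) : Prop :=
  st.2.2 = Psum arr t ∧
  st.1 = (List.range t).flatMap (chunk arr) ∧
  ∀ v, (st.2.1).get? v =
    if v ∈ (List.range (t + 1)).map (Psum arr) then some (Fjs arr v t) else none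

theorem Psum_succ (arr : List Int) (t : Nat) (h : t < arr.length) :
    Psum arr (t + 1) = Psum arr t + arr[t] := by
  rw [Psum, Psum, List.take_add_one, List.getElem?_eq_getElem h, Option.toList_some,
    List.sum_append, List.sum_cons, List.sum_nil, add_zero]

theorem AInv_zero (arr : List Int) :
    AInv arr 0 ([], PySem.Dict.ofList [((0 : Int), [(-1 : Int)])], 0) := by
  refine ⟨by simp [Psum], rfl, fun v => ?_⟩
  have hof : PySem.Dict.ofList [((0 : Int), [(-1 : Int)])] =
      PySem.Dict.empty.insert 0 [-1] := rfl
  have hP0 : Psum arr 0 = 0 := by simp [Psum]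
  rw [hof, PySem.Dict.get?_insert]
  by_cases h : v = 0
  · subst h
    rw [if_pos rfl, if_pos (by simp [hP0])]
    have : Fjs arr 0 0 = [-1] := by
      simp [Fjs, hP0]
    rw [this]
  · rw [if_neg h, PySem.Dict.get?_empty, if_neg (by simp [hP0, h])]

theorem Fjs_empty (arr : List Int) (t : Nat)
    (hmem : Psum arr (t + 1) ∉ (List.range (t + 1)).map (Psum arr)) :
    Fjs arr (Psum arr (t + 1)) t = [] := by
  rw [Fjs, List.filter_eq_nil_iff.2 ?_, List.map_nil]
  intro s hs hPs
  exact hmem (List.mem_map.2 ⟨s, hs, by simpa using hPs⟩)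

theorem AInv_step (arr : List Int) (t : Nat) (ht : t < arr.length) (st)
    (hinv : AInv arr t st) : AInv arr (t + 1) (day6Step arr st (t : Int)) := by
  obtain ⟨hc, hl, hd⟩ := hinv
  have harr : PySem.List.pyGetD arr (t : Int) 0 = arr[t] := by
    rw [PySem.List.pyGetD_natCast, List.getD_eq_getElem?_getD, List.getElem?_eq_getElem ht,
      Option.getD_some]
  have hcurr : st.2.2 + PySem.List.pyGetD arr (t : Int) 0 = Psum arr (t + 1) := by
    rw [harr, hc, Psum_succ arr t ht]
  have hmemiff : ∀ v : Int, v ∈ (List.range (t + 1 + 1)).map (Psum arr) ↔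
      v ∈ (List.range (t + 1)).map (Psum arr) ∨ v = Psum arr (t + 1) := by
    intro v
    rw [List.range_succ, List.map_append, List.mem_append]
    simp [eq_comm]
  have hFsucc : ∀ v, Fjs arr v (t + 1) =
      Fjs arr v t ++ (if Psum arr (t + 1) = v then [((t + 1 : Nat) : Int) - 1] else []) := by
    intro v
    simp only [Fjs, List.range_succ, List.filter_append, List.map_append]
    congr 1
    by_cases h : Psum arr (t + 1) = v <;> simp [h]
  have hchunk : chunk arr t =
      (Fjs arr (Psum arr (t + 1)) t).map (fun j => (j + 1, (t : Int))) := by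
    simp only [chunk, Fjs, List.map_map]
    exact List.map_congr_left (by intro s _; simp [Function.comp])
  by_cases hmem : Psum arr (t + 1) ∈ (List.range (t + 1)).map (Psum arr)
  · -- curr_sum already a key of sums
    have hget : (st.2.1).get? (Psum arr (t + 1)) = some (Fjs arr (Psum arr (t + 1)) t) := by
      rw [hd]; simp [hmem]
    have hstep : day6Step arr st (t : Int) =
        (st.1 ++ (Fjs arr (Psum arr (t + 1)) t).map (fun j => (j + 1, (t : Int))),
         (st.2.1).insert (Psum arr (t + 1)) (Fjs arr (Psum arr (t + 1)) t ++ [(t : Int)]),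
         Psum arr (t + 1)) := by
      simp only [day6Step]
      rw [hcurr, hget]
    rw [hstep]
    refine ⟨rfl, ?_, ?_⟩
    · rw [hl, List.range_succ, List.flatMap_append, List.flatMap_singleton, hchunk]
    · intro v
      rw [PySem.Dict.get?_insert]
      by_cases hv : v = Psum arr (t + 1)
      · subst hv
        rw [if_pos rfl, if_pos ((hmemiff _).2 (Or.inr rfl)), hFsucc, if_pos rfl]
        congr 2
        push_cast; ring
      · rw [if_neg hv, hd]
        have hne : ¬ Psum arr (t + 1) = v := fun h => hv h.symm
        by_cases hv2 : v ∈ (List.range (t + 1)).map (Psum arr)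
        · rw [if_pos hv2, if_pos ((hmemiff _).2 (Or.inl hv2)), hFsucc, if_neg hne,
            List.append_nil]
        · rw [if_neg hv2, if_neg (by rw [hmemiff]; tauto)]
  · -- curr_sum is a fresh key
    have hget : (st.2.1).get? (Psum arr (t + 1)) = none := by
      rw [hd]; simp [hmem]
    have hF0 := Fjs_empty arr t hmem
    have hstep : day6Step arr st (t : Int) =
        (st.1, (st.2.1).insert (Psum arr (t + 1)) [(t : Int)], Psum arr (t + 1)) := by
      simp only [day6Step]
      rw [hcurr, hget]
    rw [hstep]
    refine ⟨rfl, ?_, ?_⟩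
    · rw [hl, List.range_succ, List.flatMap_append, List.flatMap_singleton, hchunk, hF0,
        List.map_nil, List.append_nil]
    · intro v
      rw [PySem.Dict.get?_insert]
      by_cases hv : v = Psum arr (t + 1)
      · subst hv
        rw [if_pos rfl, if_pos ((hmemiff _).2 (Or.inr rfl)), hFsucc, if_pos rfl, hF0,
          List.nil_append]
        congr 2
        push_cast; ring
      · rw [if_neg hv, hd]
        have hne : ¬ Psum arr (t + 1) = v := fun h => hv h.symm
        by_cases hv2 : v ∈ (List.range (t + 1)).map (Psum arr)
        · rw [if_pos hv2, if_pos ((hmemiff _).2 (Or.inl hv2)), hFsucc, if_neg hne,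
            List.append_nil]
        · rw [if_neg hv2, if_neg (by rw [hmemiff]; tauto)]

theorem AInv_fold (arr : List Int) (t : Nat) (ht : t ≤ arr.length) :
    AInv arr t (((List.range t).map (fun k : Nat => (k : Int))).foldl (day6Step arr)
      ([], PySem.Dict.ofList [((0 : Int), [(-1 : Int)])], 0)) := by
  induction t with
  | zero => simpa using AInv_zero arr
  | succ t ih =>
    rw [List.range_succ, List.map_append, List.foldl_append, List.map_singleton,
      List.foldl_cons, List.foldl_nil]
    exact AInv_step arr t (by omega) _ (ih (by omega))

theorem day6_sol_eq (arr : List Int) :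
    day6_sol arr = (List.range arr.length).flatMap (chunk arr) := by
  unfold day6_sol
  rw [PySem.List.len_eq, PySem.List.pyRange_zero_natCast]
  exact (AInv_fold arr arr.length le_rfl).2.1

-- the prefix array B builds is List.scanl (+) 0 arr
theorem pre_general (l acc : List Int) (c : Int) :
    l.foldl (fun p x => p ++ [PySem.List.pyGetD p (-1) 0 + x]) (acc ++ [c]) =
      acc ++ List.scanl (· + ·) c l := by
  induction l generalizing acc c with
  | nil => simp
  | cons x xs ih =>
    rw [List.foldl_cons, PySem.List.pyGetD_neg_one_append_singleton]
    rw [ih (acc ++ [c]) (c + x), List.scanl_cons]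
    simp

theorem scanl_getElem? (arr : List Int) (c : Int) (t : Nat) (h : t ≤ arr.length) :
    (List.scanl (· + ·) c arr)[t]? = some (c + Psum arr t) := by
  induction arr generalizing c t with
  | nil =>
    have : t = 0 := by simpa using h
    subst this
    simp [Psum]
  | cons x xs ih =>
    rw [List.scanl_cons]
    cases t with
    | zero => simp [Psum]
    | succ t =>
      rw [List.getElem?_cons_succ, ih (c + x) t (by simpa using h)]
      congr 1
      simp [Psum, List.take_succ_cons]
      rw [add_assoc]

theorem day6_sol_alt_eq (arr : List Int) :
    day6_sol_alt arr = (List.range arr.length).flatMap (chunk arr) := by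
  unfold day6_sol_alt
  have hpre : arr.foldl (fun p x => p ++ [PySem.List.pyGetD p (-1) 0 + x]) [(0 : Int)] =
      List.scanl (· + ·) 0 arr := by
    have h := pre_general arr [] (0 : Int)
    rwa [List.nil_append, List.nil_append] at h
  rw [hpre]
  have hidx : ∀ t : Nat, t ≤ arr.length →
      PySem.List.pyGetD (List.scanl (· + ·) 0 arr) (t : Int) 0 = Psum arr t := by
    intro t ht
    rw [PySem.List.pyGetD_natCast, List.getD_eq_getElem?_getD, scanl_getElem? arr 0 t ht,
      Option.getD_some, zero_add]
  rw [PySem.List.len_eq, PySem.List.pyRange_zero_natCast, List.foldl_map]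
  suffices H : ∀ (R : List Nat) (acc : List (Int × Int)), (∀ i ∈ R, i < arr.length) →
      R.foldl (fun out (k : Nat) =>
        (PySem.List.pyRange 0 ((k : Int) + 1) 1).foldl
          (fun out s =>
            if PySem.List.pyGetD (List.scanl (· + ·) 0 arr) ((k : Int) + 1) 0 =
                PySem.List.pyGetD (List.scanl (· + ·) 0 arr) s 0 then
              out ++ [(s, (k : Int))]
            else out)
          out) acc = acc ++ R.flatMap (chunk arr) by
    have h := H (List.range arr.length) [] (fun i hi => List.mem_range.1 hi)
    rw [List.nil_append] at h
    exact h
  intro R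
  induction R with
  | nil => intro acc _; simp
  | cons i rest ih =>
    intro acc hmem
    have hi : i < arr.length := hmem i (by simp)
    rw [List.foldl_cons, List.flatMap_cons]
    have hcast : ((i : Int) + 1) = ((i + 1 : Nat) : Int) := by push_cast; ring
    have hinner :
        (PySem.List.pyRange 0 ((i : Int) + 1) 1).foldl
          (fun out s =>
            if PySem.List.pyGetD (List.scanl (· + ·) 0 arr) ((i : Int) + 1) 0 =
                PySem.List.pyGetD (List.scanl (· + ·) 0 arr) s 0 then
              out ++ [(s, (i : Int))]
            else out) acc = acc ++ chunk arr i := by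
      rw [hcast, PySem.List.pyRange_zero_natCast, List.foldl_map]
      have h1 : PySem.List.pyGetD (List.scanl (· + ·) 0 arr) ((i : Int) + 1) 0 =
          Psum arr (i + 1) := by
        rw [hcast]; exact hidx (i + 1) (by omega)
      suffices Hs : ∀ (S : List Nat) (a : List (Int × Int)), (∀ s ∈ S, s ≤ arr.length) →
          S.foldl (fun out (s : Nat) =>
            if PySem.List.pyGetD (List.scanl (· + ·) 0 arr) ((i : Int) + 1) 0 =
                PySem.List.pyGetD (List.scanl (· + ·) 0 arr) ((s : Nat) : Int) 0 then
              out ++ [((s : Int), (i : Int))]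
            else out) a =
          a ++ ((S.filter (fun s => Psum arr s = Psum arr (i + 1))).map
            (fun s : Nat => ((s : Int), (i : Int)))) by
        have h := Hs (List.range (i + 1)) acc (fun s hs => by
          have := List.mem_range.1 hs; omega)
        exact h
      intro S
      induction S with
      | nil => intro a _; simp
      | cons s ss ihs =>
        intro a hS
        have hs : s ≤ arr.length := hS s (by simp)
        have h2 : PySem.List.pyGetD (List.scanl (· + ·) 0 arr) ((s : Nat) : Int) 0 =
            Psum arr s := hidx s hs
        by_cases he : Psum arr s = Psum arr (i + 1)
        · have hc1 : PySem.List.pyGetD (List.scanl (· + ·) 0 arr) ((i : Int) + 1) 0 =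
              PySem.List.pyGetD (List.scanl (· + ·) 0 arr) ((s : Nat) : Int) 0 := by
            rw [h1, h2]; exact he.symm
          rw [List.foldl_cons, if_pos hc1, ihs _ (fun x hx => hS x (by simp [hx])),
            List.filter_cons, if_pos (by simpa using he), List.map_cons]
          simp
        · have hc2 : ¬ PySem.List.pyGetD (List.scanl (· + ·) 0 arr) ((i : Int) + 1) 0 =
              PySem.List.pyGetD (List.scanl (· + ·) 0 arr) ((s : Nat) : Int) 0 := by
            rw [h1, h2]; exact fun h => he h.symm
          rw [List.foldl_cons, if_neg hc2, ihs _ (fun x hx => hS x (by simp [hx])),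
            List.filter_cons, if_neg (by simpa using he)]
    rw [hinner, ih _ (fun x hx => hmem x (by simp [hx])), List.append_assoc]

-- ===== VERDICT (by name: the statement is the Claim_ definition above) =====
theorem day6_sol_spec : Claim_equal_day6_sol := by
  intro arr _
  unfold Spec_day6_sol
  rw [day6_sol_eq, day6_sol_alt_eq]
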